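-- pv_equiv track=rewrite | github.com/cde-ev/DokuForge2 | dokuforge/parser.py | splitrightbracket
-- ===== SOURCE A (Python) =====
-- def splitrightbracket(line):
--     line = line.rstrip()
--     closings = set([u')', u']', u'}'])
--     bracket, rest = u'', u''
--     stillbracket = True
--     for i in range(len(line)):
--         c = line[len(line)-i-1]
--         if c not in closings:
--             stillbracket = False
--         if stillbracket:
--             bracket = c + bracket
--         else:
--             rest = c + rest
--     return [rest, bracket]
-- ===== SOURCE B (Python) =====
-- def splitrightbracket(line):
--     line = line.rstrip()
--     k = 0
--     for c in reversed(line):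
--         if c in ')]}':
--             k += 1
--         else:
--             break
--     cut = len(line) - k
--     return [line[:cut], line[cut:]]
-- ===== Notes on version B (the rewrite author's own statement) =====
-- stated objective: faster
-- what changed: Instead of rebuilding both output strings by repeated string prepending inside the loop, B scans once from the end to count trailing closing brackets and then slices the line once at that boundary.
import Mathlib
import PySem

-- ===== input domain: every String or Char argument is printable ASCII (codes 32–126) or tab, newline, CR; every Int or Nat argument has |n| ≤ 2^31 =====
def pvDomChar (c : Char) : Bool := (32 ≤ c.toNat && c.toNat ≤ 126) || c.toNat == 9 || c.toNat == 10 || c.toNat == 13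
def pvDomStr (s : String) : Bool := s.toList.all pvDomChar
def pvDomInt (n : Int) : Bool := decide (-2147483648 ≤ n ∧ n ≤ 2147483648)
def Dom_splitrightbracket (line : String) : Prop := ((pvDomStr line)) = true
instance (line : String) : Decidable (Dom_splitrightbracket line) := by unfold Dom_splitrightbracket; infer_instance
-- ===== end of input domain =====

-- B replaces A's quadratic character-by-character string rebuilding with one
-- backward scan counting trailing closing brackets followed by a single slice.

-- ===== PORT A =====
def pvStepA (closings : PySem.Set Char) (acc : List Char × List Char × Bool) (c : Char) :
    List Char × List Char × Bool :=
  let st := if ¬ PySem.Set.contains closings c then false else acc.2.2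
  if st then (c :: acc.1, acc.2.1, st) else (acc.1, c :: acc.2.1, st)

def splitrightbracket (line : String) : List String :=
  let ls := PySem.Chars.rstrip line.toList
  let closings : PySem.Set Char := PySem.Set.ofList [')', ']', '}']
  let res := (PySem.List.pyRange 0 (ls.length : Int) 1).foldl
    (fun acc i => pvStepA closings acc (PySem.List.pyGetD ls ((ls.length : Int) - i - 1) ' '))
    ([], [], true)
  [String.ofList res.2.1, String.ofList res.1]

-- ===== PORT B =====
def pvCountClosing : List Char → Nat
  | [] => 0
  | c :: cs => if c = ')' ∨ c = ']' ∨ c = '}' then pvCountClosing cs + 1 else 0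

def splitrightbracket_alt (line : String) : List String :=
  let ls := PySem.Chars.rstrip line.toList
  let k := pvCountClosing ls.reverse
  let cut := ls.length - k
  [String.ofList (ls.take cut), String.ofList (ls.drop cut)]

-- ===== PRECONDITION & SPEC =====
def Spec_splitrightbracket (line : String) (out : List String) : Prop := out = splitrightbracket_alt line
instance (line : String) (out : List String) : Decidable (Spec_splitrightbracket line out) := by unfold Spec_splitrightbracket; infer_instance

-- ===== CLAIM (what is proved, stated in full; the proofs are below) =====
def Claim_equal_splitrightbracket : Prop := ∀ (line : String), Dom_splitrightbracket line → Spec_splitrightbracket line (splitrightbracket line)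

-- ===== LEMMAS AND PROOFS =====

lemma pvCountClosing_le (xs : List Char) : pvCountClosing xs ≤ xs.length := by
  induction xs with
  | nil => simp [pvCountClosing]
  | cons c cs ih =>
    simp only [pvCountClosing, List.length_cons]
    split_ifs <;> omega

lemma pvContains_iff (c : Char) :
    PySem.Set.contains (PySem.Set.ofList [')', ']', '}']) c = true ↔
      (c = ')' ∨ c = ']' ∨ c = '}') := by
  simp [PySem.Set.contains, PySem.Set.ofList, PySem.Set.add, PySem.Set.empty]

lemma pvLoopFalse (cl : PySem.Set Char) (rev b r : List Char) :
    rev.foldl (pvStepA cl) (b, r, false) = (b, rev.reverse ++ r, false) := by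
  induction rev generalizing r with
  | nil => simp
  | cons c cs ih =>
    simp only [List.foldl_cons, pvStepA, List.reverse_cons]
    simp [ih]

lemma pvLoopTrue (rev b r : List Char) :
    rev.foldl (pvStepA (PySem.Set.ofList [')', ']', '}'])) (b, r, true) =
      ((rev.take (pvCountClosing rev)).reverse ++ b,
       (rev.drop (pvCountClosing rev)).reverse ++ r,
       decide (pvCountClosing rev = rev.length)) := by
  induction rev generalizing b r with
  | nil => simp [pvCountClosing]
  | cons c cs ih =>
    by_cases hc : c = ')' ∨ c = ']' ∨ c = '}'
    · have hcl : PySem.Set.contains (PySem.Set.ofList [')', ']', '}']) c = true :=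
        (pvContains_iff c).mpr hc
      simp only [List.foldl_cons, pvStepA, hcl, pvCountClosing, if_pos hc,
        not_true, if_false, ite_true]
      norm_num [ih]
    · have hcl : PySem.Set.contains (PySem.Set.ofList [')', ']', '}']) c = false := by
        rw [Bool.eq_false_iff]
        intro h; exact hc ((pvContains_iff c).mp h)
      simp only [List.foldl_cons, pvStepA, hcl, pvCountClosing, if_neg hc]
      norm_num [pvLoopFalse]

lemma pvIndexEq (ls : List Char) (i : Int) (hi : i ∈ PySem.List.pyRange 0 (ls.length : Int) 1) :
    PySem.List.pyGetD ls ((ls.length : Int) - i - 1) ' ' =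
      PySem.List.pyGetD ls.reverse i ' ' := by
  rw [PySem.List.mem_pyRange_one] at hi
  obtain ⟨h0, hn⟩ := hi
  obtain ⟨k, rfl⟩ : ∃ k : Nat, i = (k : Int) := ⟨i.toNat, (Int.toNat_of_nonneg h0).symm⟩
  have hk : k < ls.length := by exact_mod_cast hn
  have h1 : ((ls.length : Int) - k - 1) = ((ls.length - 1 - k : Nat) : Int) := by
    push_cast [Nat.sub_sub]; omega
  rw [h1, PySem.List.pyGetD_natCast, PySem.List.pyGetD_natCast]
  have h2 : ls.length - 1 - k < ls.length := by omega
  rw [List.getD_eq_getElem _ _ (by simpa using h2), List.getD_eq_getElem _ _ (by simpa using hk)]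
  simp [List.getElem_reverse]

theorem splitrightbracket_main (line : String) :
    splitrightbracket line = splitrightbracket_alt line := by
  unfold splitrightbracket splitrightbracket_alt
  set ls := PySem.Chars.rstrip line.toList with hls
  have hcongr : (PySem.List.pyRange 0 (ls.length : Int) 1).foldl
      (fun acc i => pvStepA (PySem.Set.ofList [')', ']', '}']) acc
        (PySem.List.pyGetD ls ((ls.length : Int) - i - 1) ' '))
      (([] : List Char), ([] : List Char), true) =
      (PySem.List.pyRange 0 (ls.length : Int) 1).foldl
      (fun acc i => pvStepA (PySem.Set.ofList [')', ']', '}']) acc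
        (PySem.List.pyGetD ls.reverse i ' '))
      (([] : List Char), ([] : List Char), true) := by
    apply PySem.List.foldl_congr_mem
    intro a x hx
    rw [pvIndexEq ls x hx]
  simp only [hcongr]
  have hlen : (ls.length : Int) = (ls.reverse.length : Int) := by simp
  rw [hlen, PySem.List.foldl_pyRange_zero_pyGetD' ls.reverse ' '
    (pvStepA (PySem.Set.ofList [')', ']', '}'])) (([] : List Char), ([] : List Char), true)]
  rw [pvLoopTrue]
  have hk := pvCountClosing_le ls.reverse
  simp only [List.append_nil]
  congr 1
  · congr 1
    rw [List.reverse_drop, List.reverse_reverse]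
    simp
  · congr 2
    rw [List.reverse_take, List.reverse_reverse]
    simp

-- ===== VERDICT (by name: the statement is the Claim_ definition above) =====
theorem splitrightbracket_spec : Claim_equal_splitrightbracket := by
  intro line _
  unfold Spec_splitrightbracket
  exact splitrightbracket_main line
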